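-- pv_equiv track=rewrite | github.com/CalebMathers/advent-of-code | 2024/day_2.py | determine_report_safety
-- ===== SOURCE A (Python) =====
-- def determine_report_safety(levels: list[int]) -> bool:
--     """Returns true if the line is safe, else false."""
--
--     # check for all increasing by 1 to 3
--     if (all(levels[i] > levels[i + 1] for i in range(len(levels) - 1))
--             and all(abs(levels[i] - levels[i + 1]) in [1, 2, 3] for i in range(len(levels) - 1))):
--         return True
--
--     # check for all decreasing by 1 to 3
--     if (all(levels[i] < levels[i + 1] for i in range(len(levels) - 1))
--             and all(abs(levels[i] - levels[i + 1]) in [1, 2, 3] for i in range(len(levels) - 1))):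
--         return True
--
--     return False
-- ===== SOURCE B (Python) =====
-- def determine_report_safety(levels: list[int]) -> bool:
--     """Returns true if the line is safe, else false."""
--     if len(levels) < 2:
--         return True
--     first = levels[1] - levels[0]
--     if first > 0:
--         sign = 1
--     elif first < 0:
--         sign = -1
--     else:
--         return False
--     prev = levels[0]
--     for x in levels[1:]:
--         d = (x - prev) * sign
--         if d < 1 or d > 3:
--             return False
--         prev = x
--     return True
-- ===== Notes on version B (the rewrite author's own statement) =====
-- stated objective: alternative
-- what changed: Single forward pass with an accumulator: the direction sign is fixed by the first step, then one early-exit walk checks each scaled step is in 1..3, replacing A's four whole-list generator scans.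
import Mathlib
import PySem

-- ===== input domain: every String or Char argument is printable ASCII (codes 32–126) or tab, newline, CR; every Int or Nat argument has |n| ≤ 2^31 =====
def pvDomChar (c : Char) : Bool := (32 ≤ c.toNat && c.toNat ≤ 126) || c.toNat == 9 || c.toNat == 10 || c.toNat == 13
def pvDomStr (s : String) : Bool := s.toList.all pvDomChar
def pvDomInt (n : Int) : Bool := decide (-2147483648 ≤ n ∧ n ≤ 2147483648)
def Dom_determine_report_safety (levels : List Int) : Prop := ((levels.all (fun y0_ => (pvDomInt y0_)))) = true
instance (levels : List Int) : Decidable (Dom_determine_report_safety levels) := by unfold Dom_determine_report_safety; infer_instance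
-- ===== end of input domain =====

-- B replaces A's four whole-list scans by a single early-exit forward walk whose direction sign is fixed by the first step (alternative decomposition, same O(n) cost).
-- ===== PORT A =====
-- indices i and i+1 drawn from range(len-1) are always in bounds, so pyGet? never returns none; .getD 0 is exact here
def determine_report_safety (levels : List Int) : Bool :=
  if (PySem.List.pyRange 0 (levels.length - 1) 1).all
       (fun i => decide ((PySem.List.pyGet? levels i).getD 0 > (PySem.List.pyGet? levels (i + 1)).getD 0))
     && (PySem.List.pyRange 0 (levels.length - 1) 1).all
       (fun i => decide (|(PySem.List.pyGet? levels i).getD 0 - (PySem.List.pyGet? levels (i + 1)).getD 0| ∈ ([1, 2, 3] : List Int)))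
  then true
  else if (PySem.List.pyRange 0 (levels.length - 1) 1).all
            (fun i => decide ((PySem.List.pyGet? levels i).getD 0 < (PySem.List.pyGet? levels (i + 1)).getD 0))
          && (PySem.List.pyRange 0 (levels.length - 1) 1).all
            (fun i => decide (|(PySem.List.pyGet? levels i).getD 0 - (PySem.List.pyGet? levels (i + 1)).getD 0| ∈ ([1, 2, 3] : List Int)))
  then true
  else false

-- ===== PORT B =====
-- the for-loop over levels[1:] with accumulator prev, early return False on a bad step
def drsWalk (sign : Int) (prev : Int) : List Int → Bool
  | [] => true
  | x :: xs => if (x - prev) * sign < 1 || (x - prev) * sign > 3 then false else drsWalk sign x xs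

def determine_report_safety_alt (levels : List Int) : Bool :=
  match levels with
  | [] => true
  | [_] => true
  | a :: b :: rest =>
    let first := b - a
    if first > 0 then drsWalk 1 a (b :: rest)
    else if first < 0 then drsWalk (-1) a (b :: rest)
    else false

-- ===== PRECONDITION & SPEC =====
def Spec_determine_report_safety (levels : List Int) (out : Bool) : Prop := out = determine_report_safety_alt levels
instance (levels : List Int) (out : Bool) : Decidable (Spec_determine_report_safety levels out) := by unfold Spec_determine_report_safety; infer_instance

-- ===== CLAIM =====
def Claim_equal_determine_report_safety : Prop := ∀ (levels : List Int), Dom_determine_report_safety levels → Spec_determine_report_safety levels (determine_report_safety levels)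

-- ===== LEMMAS AND PROOFS =====

-- the walk is true iff every adjacent pair of (prev :: rest) has scaled step in 1..3
theorem drsWalk_iff_chain (sign : Int) (prev : Int) (rest : List Int) :
    drsWalk sign prev rest = true ↔
      List.IsChain (fun x y => 1 ≤ (y - x) * sign ∧ (y - x) * sign ≤ 3) (prev :: rest) := by
  induction rest generalizing prev with
  | nil => simp [drsWalk, List.IsChain.singleton]
  | cons x xs ih =>
    rw [List.isChain_cons_cons, ← ih x]
    simp only [drsWalk]
    split_ifs with h
    · simp only [Bool.or_eq_true, decide_eq_true_eq] at h
      simp only [false_iff]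
      rintro ⟨⟨h1, h2⟩, -⟩
      omega
    · simp only [Bool.or_eq_true, decide_eq_true_eq, not_or, not_lt] at h
      constructor
      · intro hw; exact ⟨⟨by omega, by omega⟩, hw⟩
      · exact fun h' => h'.2

-- A's indexed all-scan over range(len-1) is the IsChain of the pair predicate
theorem idx_iff_chain (P : Int → Int → Prop) [∀ x y : Int, Decidable (P x y)] (l : List Int) :
    ((PySem.List.pyRange 0 ((l.length : Int) - 1) 1).all
      (fun i => decide (P ((PySem.List.pyGet? l i).getD 0) ((PySem.List.pyGet? l (i + 1)).getD 0))) = true)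
      ↔ List.IsChain P l := by
  rw [List.isChain_iff_getElem]
  simp only [List.all_eq_true, PySem.List.mem_pyRange_one, decide_eq_true_eq]
  constructor
  · intro h i hi
    have h2 : (i : Int) < (l.length : Int) - 1 := by omega
    have := h (i : Int) ⟨by positivity, h2⟩
    rw [PySem.List.pyGet?_eq_some_getElem l (i := (i : Int)) (by positivity) (by omega),
        PySem.List.pyGet?_eq_some_getElem l (i := (i : Int) + 1) (by positivity) (by omega)] at this
    simpa using this
  · intro h i ⟨hi0, hi1⟩
    rw [PySem.List.pyGet?_eq_some_getElem l (i := i) hi0 (by omega),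
        PySem.List.pyGet?_eq_some_getElem l (i := i + 1) (by omega) (by omega)]
    have hlt : i.toNat + 1 < l.length := by omega
    have := h i.toNat hlt
    simp only [Option.getD_some]
    have e1 : (i + 1).toNat = i.toNat + 1 := by omega
    simp only [e1]
    simpa using this

-- specialisations of idx_iff_chain to the three scans A performs (definitional instances)
theorem idx_gt (l : List Int) :
    ((PySem.List.pyRange 0 ((l.length : Int) - 1) 1).all
      (fun i => decide ((PySem.List.pyGet? l i).getD 0 > (PySem.List.pyGet? l (i + 1)).getD 0)) = true)
      ↔ List.IsChain (fun x y : Int => x > y) l := idx_iff_chain (fun x y => x > y) l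

theorem idx_lt (l : List Int) :
    ((PySem.List.pyRange 0 ((l.length : Int) - 1) 1).all
      (fun i => decide ((PySem.List.pyGet? l i).getD 0 < (PySem.List.pyGet? l (i + 1)).getD 0)) = true)
      ↔ List.IsChain (fun x y : Int => x < y) l := idx_iff_chain (fun x y => x < y) l

theorem idx_abs (l : List Int) :
    ((PySem.List.pyRange 0 ((l.length : Int) - 1) 1).all
      (fun i => decide (|(PySem.List.pyGet? l i).getD 0 - (PySem.List.pyGet? l (i + 1)).getD 0| ∈ ([1, 2, 3] : List Int))) = true)
      ↔ List.IsChain (fun x y : Int => |x - y| ∈ ([1, 2, 3] : List Int)) l :=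
  idx_iff_chain (fun x y => |x - y| ∈ ([1, 2, 3] : List Int)) l

theorem isChain_and_iff {P Q : Int → Int → Prop} (l : List Int) :
    (List.IsChain P l ∧ List.IsChain Q l) ↔ List.IsChain (fun x y => P x y ∧ Q x y) l := by
  simp only [List.isChain_iff_getElem]
  constructor
  · rintro ⟨hp, hq⟩ i hi; exact ⟨hp i hi, hq i hi⟩
  · intro h; exact ⟨fun i hi => (h i hi).1, fun i hi => (h i hi).2⟩

theorem isChain_congr {P Q : Int → Int → Prop} (hpq : ∀ x y, P x y ↔ Q x y) (l : List Int) :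
    List.IsChain P l ↔ List.IsChain Q l := by
  simp only [List.isChain_iff_getElem]
  exact forall₂_congr (fun i hi => hpq _ _)

theorem down_pair_iff (x y : Int) :
    (x > y ∧ |x - y| ∈ ([1, 2, 3] : List Int)) ↔ (1 ≤ (y - x) * (-1) ∧ (y - x) * (-1) ≤ 3) := by
  simp only [List.mem_cons, List.not_mem_nil, or_false]
  constructor
  · rintro ⟨hgt, habs⟩
    rw [abs_of_pos (by omega)] at habs
    omega
  · rintro ⟨h1, h2⟩
    refine ⟨by omega, ?_⟩
    rw [abs_of_pos (by omega)]
    omega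

theorem up_pair_iff (x y : Int) :
    (x < y ∧ |x - y| ∈ ([1, 2, 3] : List Int)) ↔ (1 ≤ (y - x) * 1 ∧ (y - x) * 1 ≤ 3) := by
  simp only [List.mem_cons, List.not_mem_nil, or_false]
  constructor
  · rintro ⟨hlt, habs⟩
    rw [abs_of_neg (by omega)] at habs
    omega
  · rintro ⟨h1, h2⟩
    refine ⟨by omega, ?_⟩
    rw [abs_of_neg (by omega)]
    omega

theorem A_iff_chains (l : List Int) :
    determine_report_safety l = true ↔
      List.IsChain (fun x y : Int => 1 ≤ (y - x) * (-1) ∧ (y - x) * (-1) ≤ 3) l ∨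
      List.IsChain (fun x y : Int => 1 ≤ (y - x) * 1 ∧ (y - x) * 1 ≤ 3) l := by
  have edown := ((isChain_and_iff (l := l)
      (P := fun x y : Int => x > y) (Q := fun x y : Int => |x - y| ∈ ([1, 2, 3] : List Int))).trans
      (isChain_congr down_pair_iff l))
  have eup := ((isChain_and_iff (l := l)
      (P := fun x y : Int => x < y) (Q := fun x y : Int => |x - y| ∈ ([1, 2, 3] : List Int))).trans
      (isChain_congr up_pair_iff l))
  unfold determine_report_safety
  split_ifs with h1 h2
  · rw [Bool.and_eq_true, idx_gt, idx_abs] at h1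
    exact iff_of_true rfl (Or.inl (edown.mp h1))
  · rw [Bool.and_eq_true, idx_lt, idx_abs] at h2
    exact iff_of_true rfl (Or.inr (eup.mp h2))
  · refine iff_of_false (by simp) ?_
    rintro (h | h)
    · exact h1 (by rw [Bool.and_eq_true, idx_gt, idx_abs]; exact edown.mpr h)
    · exact h2 (by rw [Bool.and_eq_true, idx_lt, idx_abs]; exact eup.mpr h)

theorem B_iff_chains (l : List Int) :
    determine_report_safety_alt l = true ↔
      List.IsChain (fun x y : Int => 1 ≤ (y - x) * (-1) ∧ (y - x) * (-1) ≤ 3) l ∨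
      List.IsChain (fun x y : Int => 1 ≤ (y - x) * 1 ∧ (y - x) * 1 ≤ 3) l := by
  unfold determine_report_safety_alt
  match l with
  | [] => simp
  | [x] => simp [List.IsChain.singleton]
  | a :: b :: rest =>
    simp only
    split_ifs with h1 h2
    · rw [drsWalk_iff_chain]
      constructor
      · exact Or.inr
      · rintro (h | h)
        · exfalso
          rw [List.isChain_cons_cons] at h
          have := h.1
          omega
        · exact h
    · rw [drsWalk_iff_chain]
      constructor
      · exact Or.inl
      · rintro (h | h)
        · exact h
        · exfalso
          rw [List.isChain_cons_cons] at h
          have := h.1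
          omega
    · simp only [false_iff]
      rintro (h | h) <;>
        · rw [List.isChain_cons_cons] at h
          have := h.1
          omega

-- ===== VERDICT =====
theorem determine_report_safety_spec : Claim_equal_determine_report_safety := by
  intro levels _
  unfold Spec_determine_report_safety
  have h := (A_iff_chains levels).trans (B_iff_chains levels).symm
  cases hb : determine_report_safety_alt levels
  · cases ha : determine_report_safety levels
    · rfl
    · rw [ha, hb] at h; simpa using h.mp rfl
  · exact h.mpr hb
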